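-- pv_equiv track=rewrite | github.com/pierreaubert/scrapers | conf/script_exporter/amdgpu.py | parse
-- ===== SOURCE A (Python) =====
-- def cleanup_value(value: str) -> str:
--     split = value.split(' ')
--     return split[0]
--
-- def parse_gpu(lines: list[str]) -> tuple[int, dict]:
--     gpu = {}
--     section = ''
--     for i, line in enumerate(lines):
--         if line[0:3] == "GPU":
--             return i, gpu
--         sline = line.split(':')
--         ln = len(sline)
--         if ln == 1 or (ln == 2 and len(sline[1])==0):
--             section = sline[0].strip().lower()
--         elif len(sline) == 2:
--             value = sline[1].strip().lower()
--             if 'n/a' in value: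
--                 continue
--             key = '{}_{}'.format(section, sline[0].strip().lower())
--             gpu[key] = cleanup_value(value)
--     return -1, gpu
--
-- def parse(lines : list[str])->list[dict]:
--
--     gpus = []
--
--     i = 0
--     while i < len(lines):
--         line = lines[i]
--         if line[0:3] == 'GPU':
--             ilast, gpu = parse_gpu(lines[i+1:])
--             gpus.append(gpu)
--             if ilast == -1:
--                 break
--             i += ilast
--         i += 1
--
--     return gpus
-- ===== SOURCE B (Python) =====
-- def cleanup_value(value: str) -> str:
--     split = value.split(' ')
--     return split[0]
--
-- def parse(lines: list[str]) -> list[dict]: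
--     # One flat pass: lines before the first 'GPU' header are ignored; a header
--     # flushes the current dict and starts a fresh one; other lines update the
--     # current dict/section; the last dict is flushed at the end.
--     gpus = []
--     current = None
--     section = ''
--     for line in lines:
--         if line[0:3] == 'GPU':
--             if current is not None:
--                 gpus.append(current)
--             current = {}
--             section = ''
--         elif current is not None:
--             sline = line.split(':')
--             ln = len(sline)
--             if ln == 1 or (ln == 2 and len(sline[1]) == 0):
--                 section = sline[0].strip().lower()
--             elif ln == 2:
--                 value = sline[1].strip().lower()
--                 if 'n/a' not in value:
--                     current['{}_{}'.format(section, sline[0].strip().lower())] = cleanup_value(value)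
--     if current is not None:
--         gpus.append(current)
--     return gpus
-- ===== Notes on version B (the rewrite author's own statement) =====
-- stated objective: simpler
-- what changed: Replaces A's parse/parse_gpu split with its index-return/resume bookkeeping (and its per-header lines[i+1:] slice copy) by a single flat pass over the lines maintaining the gpus list, an optional current dict and the section string.
import Mathlib
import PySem

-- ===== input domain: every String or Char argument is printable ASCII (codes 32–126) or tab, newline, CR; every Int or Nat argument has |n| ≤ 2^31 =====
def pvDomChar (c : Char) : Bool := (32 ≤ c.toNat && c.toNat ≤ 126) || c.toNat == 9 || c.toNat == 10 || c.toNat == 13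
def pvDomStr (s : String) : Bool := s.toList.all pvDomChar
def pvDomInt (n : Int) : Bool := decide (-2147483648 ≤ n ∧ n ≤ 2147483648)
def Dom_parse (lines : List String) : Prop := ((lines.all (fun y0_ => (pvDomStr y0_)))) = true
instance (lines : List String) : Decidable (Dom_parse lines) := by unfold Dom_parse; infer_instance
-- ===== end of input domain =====

-- B replaces A's parse/parse_gpu index-resume bookkeeping by one flat pass over the
-- lines with a running current-dict/section state (objective: simpler decomposition).

-- ===== PORT A =====
-- cleanup_value(value): value.split(' ')[0]; ' ' ≠ '' so split succeeds and is non-empty,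
-- so the [0] index never raises.
def cleanup_value (value : String) : String :=
  match PySem.Str.split? value " " with
  | some (s :: _) => s
  | _ => ""   -- unreachable

-- the for-loop of parse_gpu, carrying i, gpu, section
def parseGpuGo (lines : List String) (i : Int) (gpu : PySem.Dict String String)
    (sectionv : String) : Int × PySem.Dict String String :=
  match lines with
  | [] => (-1, gpu)
  | line :: rest =>
    if PySem.Str.slice line (some 0) (some 3) = "GPU" then (i, gpu)
    else
      match PySem.Str.split? line ":" with   -- ':' ≠ '' so split never raises
      | some sline =>
        if sline.length = 1 ∨ (sline.length = 2 ∧ PySem.Str.len (sline.getD 1 "") = 0) then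
          parseGpuGo rest (i+1) gpu (PySem.Str.lower (PySem.Str.strip (sline.getD 0 "")))
        else if sline.length = 2 then
          let value := PySem.Str.lower (PySem.Str.strip (sline.getD 1 ""))
          if PySem.Str.isIn "n/a" value then parseGpuGo rest (i+1) gpu sectionv
          else parseGpuGo rest (i+1)
            (gpu.insert (sectionv ++ "_" ++ PySem.Str.lower (PySem.Str.strip (sline.getD 0 ""))) (cleanup_value value))
            sectionv
        else parseGpuGo rest (i+1) gpu sectionv
      | none => parseGpuGo rest (i+1) gpu sectionv   -- unreachable

def parse_gpu (lines : List String) : Int × PySem.Dict String String :=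
  parseGpuGo lines 0 PySem.Dict.empty ""

-- the while-loop of parse; i only moves forward, ilast ≥ 0 on the resume path so .toNat is exact
def parseLoop (lines : List String) (i : Nat) (gpus : List (PySem.Dict String String)) :
    List (PySem.Dict String String) :=
  if h : i < lines.length then
    let line := lines[i]
    if PySem.Str.slice line (some 0) (some 3) = "GPU" then
      let r := parse_gpu (PySem.List.slice lines (some ((i + 1 : Nat) : Int)) none)
      let gpus' := gpus ++ [r.2]
      if r.1 = -1 then gpus'
      else parseLoop lines (i + r.1.toNat + 1) gpus'
    else parseLoop lines (i + 1) gpus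
  else gpus
termination_by lines.length - i
decreasing_by all_goals omega

def parse (lines : List String) : List (List (String × String)) :=
  (parseLoop lines 0 []).map PySem.Dict.items

-- ===== PORT B =====
-- the for-loop of B's parse, carrying (current, section); the final flush is the [] case
def parseAltGo (lines : List String) (cur : Option (PySem.Dict String String))
    (sectionv : String) : List (PySem.Dict String String) :=
  match lines with
  | [] =>
    match cur with
    | none => []
    | some g => [g]
  | line :: rest =>
    if PySem.Str.slice line (some 0) (some 3) = "GPU" then
      match cur with
      | none => parseAltGo rest (some PySem.Dict.empty) ""
      | some g => g :: parseAltGo rest (some PySem.Dict.empty) ""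
    else
      match cur with
      | none => parseAltGo rest none sectionv
      | some g =>
        match PySem.Str.split? line ":" with   -- ':' ≠ '' so split never raises
        | some sline =>
          if sline.length = 1 ∨ (sline.length = 2 ∧ PySem.Str.len (sline.getD 1 "") = 0) then
            parseAltGo rest (some g) (PySem.Str.lower (PySem.Str.strip (sline.getD 0 "")))
          else if sline.length = 2 then
            let value := PySem.Str.lower (PySem.Str.strip (sline.getD 1 ""))
            if PySem.Str.isIn "n/a" value then parseAltGo rest (some g) sectionv
            else parseAltGo rest
              (some (g.insert (sectionv ++ "_" ++ PySem.Str.lower (PySem.Str.strip (sline.getD 0 ""))) (cleanup_value value)))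
              sectionv
          else parseAltGo rest (some g) sectionv
        | none => parseAltGo rest (some g) sectionv   -- unreachable

def parse_alt (lines : List String) : List (List (String × String)) :=
  (parseAltGo lines none "").map PySem.Dict.items

-- ===== PRECONDITION & SPEC =====
def Spec_parse (lines : List String) (out : List (List (String × String))) : Prop := out = parse_alt lines
instance (lines : List String) (out : List (List (String × String))) : Decidable (Spec_parse lines out) := by unfold Spec_parse; infer_instance

-- ===== CLAIM (what is proved, stated in full; the proofs are below) =====
def Claim_equal_parse : Prop := ∀ (lines : List String), Dom_parse lines → Spec_parse lines (parse lines)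

-- ===== LEMMAS AND PROOFS =====

-- the common per-line update both loops perform on (dict, section)
def pvStep (g : PySem.Dict String String) (sectionv : String) (line : String) :
    PySem.Dict String String × String :=
  match PySem.Str.split? line ":" with
  | some sline =>
    if sline.length = 1 ∨ (sline.length = 2 ∧ PySem.Str.len (sline.getD 1 "") = 0) then
      (g, PySem.Str.lower (PySem.Str.strip (sline.getD 0 "")))
    else if sline.length = 2 then
      let value := PySem.Str.lower (PySem.Str.strip (sline.getD 1 ""))
      if PySem.Str.isIn "n/a" value then (g, sectionv)
      else (g.insert (sectionv ++ "_" ++ PySem.Str.lower (PySem.Str.strip (sline.getD 0 ""))) (cleanup_value value), sectionv)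
    else (g, sectionv)
  | none => (g, sectionv)

lemma parseGpuGo_cons_nonheader (l : String) (rest : List String) (i : Int)
    (g : PySem.Dict String String) (sec : String)
    (h : ¬ PySem.Str.slice l (some 0) (some 3) = "GPU") :
    parseGpuGo (l :: rest) i g sec
      = parseGpuGo rest (i+1) (pvStep g sec l).1 (pvStep g sec l).2 := by
  simp only [parseGpuGo, pvStep, if_neg h]
  cases PySem.Str.split? l ":" with
  | none => rfl
  | some sline => dsimp only; split_ifs <;> rfl

lemma parseAltGo_cons_nonheader (l : String) (rest : List String)
    (g : PySem.Dict String String) (sec : String)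
    (h : ¬ PySem.Str.slice l (some 0) (some 3) = "GPU") :
    parseAltGo (l :: rest) (some g) sec
      = parseAltGo rest (some (pvStep g sec l).1) (pvStep g sec l).2 := by
  simp only [parseAltGo, pvStep, if_neg h]
  cases PySem.Str.split? l ":" with
  | none => rfl
  | some sline => dsimp only; split_ifs <;> rfl

lemma parseGpuGo_fst_lb (lines : List String) : ∀ (i : Int) (g : PySem.Dict String String)
    (sec : String), (parseGpuGo lines i g sec).1 = -1 ∨ i ≤ (parseGpuGo lines i g sec).1 := by
  induction lines with
  | nil => intro i g sec; left; rfl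
  | cons l rest ih =>
    intro i g sec
    by_cases h : PySem.Str.slice l (some 0) (some 3) = "GPU"
    · right; simp [parseGpuGo, h]
    · rw [parseGpuGo_cons_nonheader l rest i g sec h]
      rcases ih (i+1) (pvStep g sec l).1 (pvStep g sec l).2 with h1 | h1
      · left; exact h1
      · right; omega

-- the structural form of A's while loop on the suffix lines.drop i
def parseA : List String → List (PySem.Dict String String) → List (PySem.Dict String String)
  | [], gpus => gpus
  | l :: rest, gpus =>
    if PySem.Str.slice l (some 0) (some 3) = "GPU" then
      let r := parse_gpu rest
      let gpus' := gpus ++ [r.2]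
      if r.1 = -1 then gpus' else parseA (rest.drop r.1.toNat) gpus'
    else parseA rest gpus
termination_by lines _ => lines.length
decreasing_by all_goals simp [List.length_drop]

lemma parseA_cons_header (l : String) (rest : List String)
    (gpus : List (PySem.Dict String String))
    (h : PySem.Str.slice l (some 0) (some 3) = "GPU") :
    parseA (l :: rest) gpus
      = if (parse_gpu rest).1 = -1 then gpus ++ [(parse_gpu rest).2]
        else parseA (rest.drop (parse_gpu rest).1.toNat) (gpus ++ [(parse_gpu rest).2]) := by
  simp [parseA, h]

lemma parseA_cons_nonheader (l : String) (rest : List String)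
    (gpus : List (PySem.Dict String String))
    (h : ¬ PySem.Str.slice l (some 0) (some 3) = "GPU") :
    parseA (l :: rest) gpus = parseA rest gpus := by
  simp [parseA, h]

-- A's inner loop result, consumed as parseA consumes it, equals B's loop with a live dict
lemma gpu_to_alt (lines : List String) : ∀ (i : Int), 0 ≤ i →
    ∀ (g : PySem.Dict String String) (sec : String) (gpus : List (PySem.Dict String String)),
    (if (parseGpuGo lines i g sec).1 = -1
      then gpus ++ [(parseGpuGo lines i g sec).2]
      else parseA (lines.drop ((parseGpuGo lines i g sec).1 - i).toNat)
             (gpus ++ [(parseGpuGo lines i g sec).2]))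
    = gpus ++ parseAltGo lines (some g) sec := by
  induction lines with
  | nil => intro i _ g sec gpus; simp [parseGpuGo, parseAltGo]
  | cons l rest ih =>
    intro i hi g sec gpus
    by_cases h : PySem.Str.slice l (some 0) (some 3) = "GPU"
    · have hgo : parseGpuGo (l :: rest) i g sec = (i, g) := by simp [parseGpuGo, h]
      rw [hgo]
      have hne : ¬ (i = -1) := by omega
      rw [if_neg hne]
      have hdrop : ((i - i).toNat) = 0 := by omega
      rw [hdrop, List.drop_zero]
      rw [parseA_cons_header _ _ _ h]
      have := ih 0 (by omega) PySem.Dict.empty "" (gpus ++ [g])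
      simp only [parse_gpu, Int.sub_zero] at this ⊢
      rw [this]
      simp [parseAltGo, h]
    · rw [parseGpuGo_cons_nonheader l rest i g sec h,
          parseAltGo_cons_nonheader l rest g sec h]
      rcases parseGpuGo_fst_lb rest (i+1) (pvStep g sec l).1 (pvStep g sec l).2 with h1 | h1
      · rw [if_pos h1]
        have := ih (i+1) (by omega) (pvStep g sec l).1 (pvStep g sec l).2 gpus
        rw [if_pos h1] at this
        exact this
      · set r := parseGpuGo rest (i+1) (pvStep g sec l).1 (pvStep g sec l).2 with hr
        have hne : ¬ (r.1 = -1) := by omega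
        rw [if_neg hne]
        have := ih (i+1) (by omega) (pvStep g sec l).1 (pvStep g sec l).2 gpus
        rw [← hr, if_neg hne] at this
        rw [← this]
        congr 1
        have : (r.1 - i).toNat = (r.1 - (i+1)).toNat + 1 := by omega
        rw [this, List.drop_succ_cons]

lemma parseA_eq_alt (lines : List String) : ∀ (gpus : List (PySem.Dict String String)),
    parseA lines gpus = gpus ++ parseAltGo lines none "" := by
  induction lines with
  | nil => intro gpus; simp [parseA, parseAltGo]
  | cons l rest ih =>
    intro gpus
    by_cases h : PySem.Str.slice l (some 0) (some 3) = "GPU"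
    · rw [parseA_cons_header _ _ _ h]
      have := gpu_to_alt rest 0 (by omega) PySem.Dict.empty "" gpus
      simp only [parse_gpu, Int.sub_zero] at this ⊢
      rw [this]
      simp [parseAltGo, h]
    · have hB : parseAltGo (l :: rest) none "" = parseAltGo rest none "" := by
        simp [parseAltGo, h]
      rw [parseA_cons_nonheader _ _ _ h, hB, ih]

lemma parseLoop_eq_parseA (n : Nat) : ∀ (lines : List String) (i : Nat)
    (gpus : List (PySem.Dict String String)), lines.length - i ≤ n →
    parseLoop lines i gpus = parseA (lines.drop i) gpus := by
  induction n with
  | zero =>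
    intro lines i gpus hn
    have hge : ¬ (i < lines.length) := by omega
    rw [parseLoop, dif_neg hge, List.drop_eq_nil_of_le (by omega)]
    simp [parseA]
  | succ n ih =>
    intro lines i gpus hn
    by_cases hlt : i < lines.length
    · rw [List.drop_eq_getElem_cons hlt]
      by_cases h : PySem.Str.slice lines[i] (some 0) (some 3) = "GPU"
      · have hslice : PySem.List.slice lines (some ((i + 1 : Nat) : Int)) none
            = lines.drop (i+1) := by
          rw [PySem.List.slice_from lines (by omega)]
          norm_num
        have hL : parseLoop lines i gpus
            = if (parse_gpu (lines.drop (i+1))).1 = -1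
              then gpus ++ [(parse_gpu (lines.drop (i+1))).2]
              else parseLoop lines (i + (parse_gpu (lines.drop (i+1))).1.toNat + 1)
                     (gpus ++ [(parse_gpu (lines.drop (i+1))).2]) := by
          rw [parseLoop, dif_pos hlt]
          simp only [hslice, if_pos h]
        rw [hL, parseA_cons_header _ _ _ h]
        by_cases hm1 : (parse_gpu (lines.drop (i+1))).1 = -1
        · rw [if_pos hm1, if_pos hm1]
        · rw [if_neg hm1, if_neg hm1,
              ih lines (i + (parse_gpu (lines.drop (i+1))).1.toNat + 1)
                (gpus ++ [(parse_gpu (lines.drop (i+1))).2]) (by omega),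
              List.drop_drop]
          have he : i + (parse_gpu (lines.drop (i+1))).1.toNat + 1
              = i + 1 + (parse_gpu (lines.drop (i+1))).1.toNat := by omega
          rw [he]
      · have hL : parseLoop lines i gpus = parseLoop lines (i+1) gpus := by
          rw [parseLoop, dif_pos hlt]
          simp only [if_neg h]
        rw [hL, parseA_cons_nonheader _ _ _ h, ih lines (i+1) gpus (by omega)]
    · rw [parseLoop, dif_neg hlt, List.drop_eq_nil_of_le (by omega)]
      simp [parseA]

-- ===== VERDICT (by name: the statement is the Claim_ definition above) =====
theorem parse_spec : Claim_equal_parse := by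
  intro lines _
  unfold Spec_parse parse parse_alt
  rw [parseLoop_eq_parseA lines.length lines 0 [] (by omega), List.drop_zero,
      parseA_eq_alt, List.nil_append]
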